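-- pv_equiv track=rewrite | github.com/Dsbaule/INE5452 | Simulado 03/RainhasAmigasComUmaIntriga/src/__main__.py | intriga
-- ===== SOURCE A (Python) =====
-- def intriga(n):
--     # Inicializa um tabuleiro sem rainhas
--     tabuleiro = [None for _ in range(n)]
--
--     # Inicializa o numero minimo de rainhas com o máximo de rainhas possivel (numero de linhas)
--     minimum = len(tabuleiro)
--     minimum_pos = list()
--
--     # Testa a rainha causadora de intrigas em cada posição
--     # Testa cada linha
--     for i in range(len(tabuleiro)):
--         # Testa cada coluna
--         for j in range(len(tabuleiro)):
--             tabuleiro[i] = j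
--
--             # Para cada posicao, verifica o numero maximo de rainhas amigas possivel
--             cur_min = rainha(tabuleiro, 1)
--
--             # Caso seja menor do que o menor obtido até agora, descarta os resultados anteriores
--             if cur_min < minimum:
--                 minimum = cur_min
--                 minimum_pos = [(i, j)]
--
--             # Caso seja igual, concatena a posição atual aos resultados anteriores
--             elif cur_min == minimum:
--                 minimum_pos.append((i, j))
--
--         # Reseta a posição atual
--         tabuleiro[i] = None
--
--     # Retorna o menor numero de rainhas amigas possivel encontrado e as posições correspondentes
--     # para a rainha causadora de intrigas
--     return minimum, minimum_pos
--
-- def rainha(tabuleiro, k, i = 0):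
--     maximum = k
--
--     # Caso a posição esteja fora do tabuleiro, retorne o numero de rainhas até agora
--     if i >= len(tabuleiro):
--         return maximum
--
--     # Caso ja tenha alguma rainha na linha atual, teste a proxima posição
--     if tabuleiro[i] != None:
--         return rainha(tabuleiro, k, i + 1)
--
--     # Para cada coluna possivel
--     for j in range(len(tabuleiro)):
--         # Se a posição for livre de intrigas
--         if safe(tabuleiro, i, j):
--             # Posicione uma rainha nela
--             tabuleiro[i] = j
--
--             # Obtenha o maximo possivel com essa rainha posicionada
--             cur_max = rainha(tabuleiro, k + 1, i + 1)
--
--             # Se for maior que o maximo obtido anteriormente, substitua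
--             if cur_max > maximum:
--                 maximum = cur_max
--
--     # Retira a rainha da posição
--     tabuleiro[i] = None
--
--     # Teste uma ultima vez, com a linha vazia
--     cur_max = rainha(tabuleiro, k, i + 1)
--     # Se for maior que o maximo obtido anteriormente, substitua
--     if cur_max > maximum:
--         maximum = cur_max
--
--     # Retorne o valor máximo obtido
--     return maximum
--
-- def safe(tabuleiro, i, j):
--     for linha in range(len(tabuleiro)):
--         if (linha != i) and (tabuleiro[linha] != None):
--             if (tabuleiro[linha] == j) or (abs(linha - i) == abs(tabuleiro[linha] - j)):
--                 return False
--     return True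
-- ===== SOURCE B (Python) =====
-- def intriga(n):
--     vals = []
--     for i in range(n):
--         for j in range(n):
--             vals.append(((i, j), 1 + _max_friends(n, i, j)))
--     m = max(0, n)
--     for _, v in vals:
--         if v < m:
--             m = v
--     pos = [p for p, v in vals if v == m]
--     return m, pos
--
-- def _max_friends(n, i, j):
--     # Layered breadth-first expansion over rows; states carry occupied
--     # columns / diagonals / anti-diagonals and the count of friends placed.
--     frontier = [((j,), (i - j,), (i + j,), 0)]
--     for r in range(n):
--         if r == i:
--             continue
--         nxt = []
--         for cols, d1, d2, cnt in frontier: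
--             nxt.append((cols, d1, d2, cnt))
--             for c in range(n):
--                 if c not in cols and r - c not in d1 and r + c not in d2:
--                     nxt.append((cols + (c,), d1 + (r - c,), d2 + (r + c,), cnt + 1))
--         frontier = nxt
--     return max(cnt for _, _, _, cnt in frontier)
-- ===== Notes on version B (the rewrite author's own statement) =====
-- stated objective: alternative
-- what changed: rainha's board-mutating depth-first recursion with a per-node safe() scan over the whole board is replaced by an iterative breadth-first layer expansion over rows: a frontier of states (occupied-column, diagonal and anti-diagonal tuples plus a count) is rebuilt row by row with constraint-set membership tests, and the answer is a max over the final frontier; the top level collects all (position,value) pairs once and takes min-then-filter instead of a running minimum with reset/append.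
import Mathlib
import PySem

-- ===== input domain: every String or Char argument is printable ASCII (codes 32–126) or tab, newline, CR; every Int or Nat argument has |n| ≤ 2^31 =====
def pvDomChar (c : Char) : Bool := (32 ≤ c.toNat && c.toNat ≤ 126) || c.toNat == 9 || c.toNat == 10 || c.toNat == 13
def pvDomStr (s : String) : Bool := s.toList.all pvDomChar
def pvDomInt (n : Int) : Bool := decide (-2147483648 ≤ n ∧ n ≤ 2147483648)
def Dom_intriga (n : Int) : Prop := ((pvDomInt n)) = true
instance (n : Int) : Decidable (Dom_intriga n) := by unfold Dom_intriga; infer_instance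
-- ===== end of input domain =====

-- B replaces A's board-mutating depth-first recursion (safe() scanning the whole board at
-- every node, running min with reset/append at the top) by an iterative breadth-first layer
-- expansion over rows, whose states carry the occupied columns / diagonals / anti-diagonals
-- and a count, plus a two-pass min-then-filter at the top.
-- A mutates its local list `tabuleiro` in place; it is not observable by the caller.

-- ===== PORT A =====
-- safe(tabuleiro, i, j): the early-return row loop is the short-circuiting `all` of the
-- negated condition (exact).
def safeA (b : List (Option Int)) (i j : Int) : Bool :=
  (PySem.List.pyRange 0 (PySem.List.len b) 1).all fun linha =>
    match PySem.List.pyGetD b linha none with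
    | none => true
    | some c => !(linha != i && (c == j || (linha - i).natAbs == (c - j).natAbs))

-- rainha(tabuleiro, k, i): fuel makes the i+1 recursion structural; intriga passes
-- fuel = len(tabuleiro)+1, more than the recursion depth, so fuel 0 is never reached.
-- Python mutates tabuleiro[i] and restores it to None before returning, and safe ignores
-- row i, so passing the unmodified board to safeA and the updated board to the recursive
-- call is exact.
def rainhaA : Nat → List (Option Int) → Int → Int → Int
  | 0, _, k, _ => k
  | fuel+1, b, k, i =>
    if i ≥ PySem.List.len b then k
    else
      match PySem.List.pyGetD b i none with
      | some _ => rainhaA fuel b k (i+1)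
      | none =>
        let maximum := (PySem.List.pyRange 0 (PySem.List.len b) 1).foldl (fun maximum j =>
          if safeA b i j then
            let cur := rainhaA fuel (PySem.List.pySetD b i (some j)) (k+1) (i+1)
            if cur > maximum then cur else maximum
          else maximum) k
        let cur := rainhaA fuel b k (i+1)
        if cur > maximum then cur else maximum

def intriga (n : Int) : Int × (List (Int × Int)) :=
  let tab : List (Option Int) := (PySem.List.pyRange 0 n 1).map (fun _ => none)
  (PySem.List.pyRange 0 (PySem.List.len tab) 1).foldl (fun st i =>
    (PySem.List.pyRange 0 (PySem.List.len tab) 1).foldl (fun st j =>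
      -- board seen by rainha: row i = j, everything else None (outer loop resets row i)
      let cur_min := rainhaA (tab.length + 1) (PySem.List.pySetD tab i (some j)) 1 0
      if cur_min < st.1 then (cur_min, [(i, j)])
      else if cur_min = st.1 then (st.1, st.2 ++ [(i, j)])
      else st) st) (PySem.List.len tab, [])

-- ===== PORT B =====
-- max(cnt for ...): Python raises ValueError on an empty sequence; the frontier always
-- contains at least its initial state, so the [] branch is unreachable here.
def pyMax : List Int → Int
  | [] => 0
  | x :: t => t.foldl max x

-- _max_friends(n, i, j): breadth-first layer expansion; a state is
-- (columns, r-c diagonals, r+c anti-diagonals, count), seeded with the intriga queen.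
def maxFriends (n i j : Int) : Int :=
  let frontier := (PySem.List.pyRange 0 n 1).foldl (fun frontier r =>
    if r == i then frontier
    else frontier.foldl (fun nxt st =>
      let nxt := nxt ++ [st]
      (PySem.List.pyRange 0 n 1).foldl (fun nxt c =>
        if !(st.1.contains c) && !(st.2.1.contains (r - c)) && !(st.2.2.1.contains (r + c)) then
          nxt ++ [(st.1 ++ [c], st.2.1 ++ [r - c], st.2.2.1 ++ [r + c], st.2.2.2 + 1)]
        else nxt) nxt) []) [([j], [i - j], [i + j], 0)]
  pyMax (frontier.map (fun st => st.2.2.2))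

def intriga_alt (n : Int) : Int × (List (Int × Int)) :=
  let vals := (PySem.List.pyRange 0 n 1).foldl (fun vals i =>
    (PySem.List.pyRange 0 n 1).foldl (fun vals j =>
      vals ++ [((i, j), 1 + maxFriends n i j)]) vals) []
  let m := vals.foldl (fun m pv => if pv.2 < m then pv.2 else m) (max 0 n)
  (m, vals.filterMap (fun pv => if pv.2 = m then some pv.1 else none))

-- ===== PRECONDITION & SPEC =====
def Spec_intriga (n : Int) (out : Int × (List (Int × Int))) : Prop := out = intriga_alt n
instance (n : Int) (out : Int × (List (Int × Int))) : Decidable (Spec_intriga n out) := by unfold Spec_intriga; infer_instance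

-- ===== CLAIM (what is proved, stated in full; the proofs are below) =====
def Claim_equal_intriga : Prop := ∀ (n : Int), Dom_intriga n → Spec_intriga n (intriga n)

-- ===== LEMMAS AND PROOFS =====

-- Proof-only recursive characterisation of the search: maximal number of additional queens
-- on rows r..n-1 given the placed (row, col) pairs; the Nat index counts remaining rows.
def okB (placed : List (Int × Int)) (i j : Int) : Bool :=
  placed.all fun rc => rc.1 == i || (rc.2 != j && (rc.1 - i).natAbs != (rc.2 - j).natAbs)

def W : Nat → List (Int × Int) → Int → Int → Int
  | 0, _, _, _ => 0
  | k+1, placed, i, n =>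
    if i ≥ n then 0
    else if placed.any (fun rc => rc.1 == i) then W k placed (i+1) n
    else
      let cands := (PySem.List.pyRange 0 n 1).filterMap (fun j =>
        if okB placed i j then some (1 + W k (placed ++ [(i, j)]) (i+1) n) else none)
      cands.foldl max (W k placed (i+1) n)

-- Proof-only: the (row, col) pairs of the occupied cells of a board, rows counted from off.
def pairsOf : List (Option Int) → Int → List (Int × Int)
  | [], _ => []
  | none :: t, off => pairsOf t (off + 1)
  | some c :: t, off => (off, c) :: pairsOf t (off + 1)

lemma mem_pairsOf {b : List (Option Int)} {off : Int} {x : Int × Int} :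
    x ∈ pairsOf b off ↔ ∃ (k : Nat) (h : k < b.length), b[k] = some x.2 ∧ x.1 = off + k := by
  induction b generalizing off with
  | nil => simp [pairsOf]
  | cons a t ih =>
    cases a with
    | none =>
      simp only [pairsOf, ih]
      constructor
      · rintro ⟨k, hk, h1, h2⟩
        exact ⟨k+1, by simpa using hk, by simpa using h1, by push_cast; omega⟩
      · rintro ⟨k, hk, h1, h2⟩
        cases k with
        | zero => simp at h1
        | succ k =>
          exact ⟨k, by simpa using hk, by simpa using h1, by push_cast at h2 ⊢; omega⟩
    | some c =>
      simp only [pairsOf, List.mem_cons, ih]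
      constructor
      · rintro (rfl | ⟨k, hk, h1, h2⟩)
        · exact ⟨0, by simp, by simp, by simp⟩
        · exact ⟨k+1, by simpa using hk, by simpa using h1, by push_cast; omega⟩
      · rintro ⟨k, hk, h1, h2⟩
        cases k with
        | zero =>
          left
          simp at h1 h2
          obtain ⟨x1, x2⟩ := x
          simp_all
        | succ k =>
          right
          exact ⟨k, by simpa using hk, by simpa using h1, by push_cast at h2 ⊢; omega⟩

lemma pairsOf_of_all_none {b : List (Option Int)} (h : ∀ a ∈ b, a = none) : ∀ (off : Int),
    pairsOf b off = [] := by
  induction b with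
  | nil => intro off; rfl
  | cons a t ih =>
    intro off
    have ha := h a (by simp)
    subst ha
    exact ih (fun a ha => h a (by simp [ha])) (off + 1)

lemma any_mem_congr {α : Type} {p q : List α} (h : ∀ x, x ∈ p ↔ x ∈ q) (f : α → Bool) :
    p.any f = q.any f := by
  rw [Bool.eq_iff_iff]
  simp only [List.any_eq_true]
  exact ⟨fun ⟨x, hx, hf⟩ => ⟨x, (h x).1 hx, hf⟩, fun ⟨x, hx, hf⟩ => ⟨x, (h x).2 hx, hf⟩⟩

lemma all_mem_congr {α : Type} {p q : List α} (h : ∀ x, x ∈ p ↔ x ∈ q) (f : α → Bool) :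
    p.all f = q.all f := by
  rw [Bool.eq_iff_iff]
  simp only [List.all_eq_true]
  exact ⟨fun hp x hx => hp x ((h x).2 hx), fun hq x hx => hq x ((h x).1 hx)⟩

-- W depends on `placed` only through membership.
lemma W_ext : ∀ (m : Nat) (p q : List (Int × Int)) (i n : Int),
    (∀ x, x ∈ p ↔ x ∈ q) → W m p i n = W m q i n := by
  intro m
  induction m with
  | zero => intro p q i n h; rfl
  | succ m ih =>
    intro p q i n h
    have hany : p.any (fun rc => rc.1 == i) = q.any (fun rc => rc.1 == i) := any_mem_congr h _
    have hok : ∀ j, okB p i j = okB q i j := fun j => all_mem_congr h _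
    have h1 : W m p (i+1) n = W m q (i+1) n := ih p q _ _ h
    have h2 : ∀ j, W m (p ++ [(i, j)]) (i+1) n = W m (q ++ [(i, j)]) (i+1) n :=
      fun j => ih _ _ _ _ (by intro x; simp [h x])
    simp only [W, hany, h1]
    have h3 : (PySem.List.pyRange 0 n 1).filterMap
          (fun j => if okB p i j then some (1 + W m (p ++ [(i, j)]) (i+1) n) else none)
        = (PySem.List.pyRange 0 n 1).filterMap
          (fun j => if okB q i j then some (1 + W m (q ++ [(i, j)]) (i+1) n) else none) :=
      List.filterMap_congr (fun j _ => by rw [hok j, h2 j])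
    rw [h3]

lemma safeA_eq_okB (b : List (Option Int)) (i j : Int) :
    safeA b i j = okB (pairsOf b 0) i j := by
  rw [Bool.eq_iff_iff]
  simp only [safeA, okB, List.all_eq_true, PySem.List.len_eq, PySem.List.mem_pyRange_one]
  constructor
  · rintro hs rc hrc
    obtain ⟨r1, r2⟩ := rc
    obtain ⟨k, hk, hbk, hrc1⟩ := mem_pairsOf.mp hrc
    have H := hs (k : Int) ⟨by omega, by exact_mod_cast hk⟩
    rw [PySem.List.pyGetD_eq_getElem b none (by omega) (by exact_mod_cast hk)] at H
    simp only [Int.toNat_natCast] at H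
    rw [hbk] at H
    simp only [zero_add] at hrc1
    subst hrc1
    simp at H ⊢
    tauto
  · rintro ho linha ⟨hl0, hllen⟩
    rw [PySem.List.pyGetD_eq_getElem b none hl0 hllen]
    cases hbv : b[linha.toNat]'(by omega) with
    | none => simp
    | some c =>
      have hmem : (linha, c) ∈ pairsOf b 0 :=
        mem_pairsOf.mpr ⟨linha.toNat, by omega, hbv, by simp; omega⟩
      have H := ho _ hmem
      simp at H ⊢
      tauto

lemma W_nonneg : ∀ (m : Nat) (p : List (Int × Int)) (i n : Int), 0 ≤ W m p i n := by
  intro m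
  induction m with
  | zero => intro p i n; simp [W]
  | succ m ih =>
    intro p i n
    simp only [W]
    split_ifs with h1 h2
    · exact le_refl 0
    · exact ih p (i+1) n
    · exact le_trans (ih p (i+1) n) (PySem.List.le_foldl_max _ _).1

lemma W_of_ge {m : Nat} {p : List (Int × Int)} {i n : Int} (h : i ≥ n) : W m p i n = 0 := by
  cases m with
  | zero => rfl
  | succ m => simp [W, h]

lemma if_gt_eq_max (a b : Int) : (if b > a then b else a) = max a b := by
  rcases lt_trichotomy a b with h | h | h <;> simp [max_def, *] <;> omega

lemma foldl_if_gt_filterMap (l : List Int) (pb : Int → Bool) (f : Int → Int) : ∀ (a : Int),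
    l.foldl (fun m j => if pb j then (if f j > m then f j else m) else m) a
      = (l.filterMap (fun j => if pb j then some (f j) else none)).foldl max a := by
  induction l with
  | nil => intro a; rfl
  | cons x t ih =>
    intro a
    simp only [List.foldl_cons, List.filterMap_cons]
    by_cases h : pb x
    · simp only [h, if_true]
      rw [ih, if_gt_eq_max, List.foldl_cons]
    · simp [h, ih]

lemma foldl_max_max (l : List Int) : ∀ (a x : Int),
    l.foldl max (max a x) = max x (l.foldl max a) := by
  induction l with
  | nil => intro a x; simp [max_comm]
  | cons y t ih =>
    intro a x
    simp only [List.foldl_cons]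
    rw [max_assoc, max_comm x y, ← max_assoc, ih]

lemma foldl_max_add (l : List Int) (k : Int) : ∀ (a : Int),
    (l.map (fun v => k + v)).foldl max (k + a) = k + l.foldl max a := by
  induction l with
  | nil => intro a; rfl
  | cons y t ih =>
    intro a
    simp only [List.map_cons, List.foldl_cons]
    rw [max_add_add_left]
    exact ih (max a y)

-- board with one extra queen: the pair list gains exactly (i, j)
lemma mem_pairsOf_set {b : List (Option Int)} {i : Int} (h0 : 0 ≤ i) (hi : i.toNat < b.length)
    (hnone : b[i.toNat] = none) (j : Int) (x : Int × Int) :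
    x ∈ pairsOf (b.set i.toNat (some j)) 0 ↔ x ∈ pairsOf b 0 ++ [(i, j)] := by
  simp only [List.mem_append, List.mem_singleton, mem_pairsOf, List.length_set]
  constructor
  · rintro ⟨k, hk, hbk, hx1⟩
    by_cases hki : k = i.toNat
    · subst hki
      rw [List.getElem_set_self] at hbk
      right
      obtain ⟨x1, x2⟩ := x
      simp only [Option.some_inj] at hbk
      simp only [Prod.mk.injEq]
      constructor
      · simp only [zero_add] at hx1; omega
      · exact hbk.symm
    · left
      rw [List.getElem_set_ne (fun h => hki h.symm)] at hbk
      exact ⟨k, hk, hbk, hx1⟩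
  · rintro (⟨k, hk, hbk, hx1⟩ | hx)
    · have hki : k ≠ i.toNat := by
        intro h
        subst h
        rw [hnone] at hbk
        simp at hbk
      exact ⟨k, hk, by rw [List.getElem_set_ne (fun h => hki h.symm)]; exact hbk, hx1⟩
    · subst hx
      exact ⟨i.toNat, hi, by rw [List.getElem_set_self], by simp; omega⟩

-- the A-side bridge: rainha = k + W on the board's pair list
lemma rainha_eq : ∀ (fuel : Nat) (b : List (Option Int)) (k i : Int),
    0 ≤ i → (b.length : Int) - i < fuel →
    rainhaA fuel b k i = k + W ((b.length : Int) - i).toNat (pairsOf b 0) i b.length := by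
  intro fuel
  induction fuel with
  | zero =>
    intro b k i h0 hf
    have h1 : ((b.length : Int) - i).toNat = 0 := by omega
    rw [h1]
    simp [rainhaA, W]
  | succ fuel ih =>
    intro b k i h0 hf
    simp only [rainhaA, PySem.List.len_eq]
    by_cases hge : i ≥ (b.length : Int)
    · rw [if_pos hge, W_of_ge hge]
      omega
    · rw [if_neg hge]
      have hlt : i < (b.length : Int) := by omega
      have hiN : i.toNat < b.length := by omega
      have hm : ((b.length : Int) - i).toNat = ((b.length : Int) - (i+1)).toNat + 1 := by omega
      rw [hm]
      have hget : PySem.List.pyGetD b i none = b[i.toNat]'hiN :=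
        PySem.List.pyGetD_eq_getElem b none h0 hlt
      cases ho : b[i.toNat]'hiN with
      | some c =>
        have hpg : PySem.List.pyGetD b i none = some c := by rw [hget, ho]
        have hany : (pairsOf b 0).any (fun rc => rc.1 == i) = true :=
          List.any_eq_true.mpr ⟨(i, c), mem_pairsOf.mpr ⟨i.toNat, hiN, ho, by simp; omega⟩, by simp⟩
        simp only [hpg, W, hany, if_true, if_neg (not_le.mpr hlt)]
        exact ih b k (i+1) (by omega) (by omega)
      | none =>
        have hpg : PySem.List.pyGetD b i none = none := by rw [hget, ho]
        have hnoany : ¬ ((pairsOf b 0).any (fun rc => rc.1 == i) = true) := by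
          simp only [List.any_eq_true, not_exists]
          rintro rc ⟨hrc, hrci⟩
          obtain ⟨k', hk', hbk', hrc1⟩ := mem_pairsOf.mp hrc
          simp only [beq_iff_eq] at hrci
          have : k' = i.toNat := by omega
          subst this
          rw [ho] at hbk'
          simp at hbk'
        simp only [hpg, W, if_neg hnoany, if_neg (not_le.mpr hlt)]
        -- per-column value, via ih and the pair-list view of the updated board
        have hcur : ∀ j : Int, rainhaA fuel (PySem.List.pySetD b i (some j)) (k+1) (i+1)
            = k + (1 + W ((b.length : Int) - (i+1)).toNat (pairsOf b 0 ++ [(i, j)]) (i+1) (b.length : Int)) := by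
          intro j
          rw [PySem.List.pySetD_of_nonneg b (some j) h0]
          rw [ih (b.set i.toNat (some j)) (k+1) (i+1) (by omega)
            (by rw [List.length_set]; omega)]
          rw [List.length_set]
          rw [W_ext _ _ _ _ _ (mem_pairsOf_set h0 hiN ho j)]
          ring
        have hskip : rainhaA fuel b k (i+1)
            = k + W ((b.length : Int) - (i+1)).toNat (pairsOf b 0) (i+1) (b.length : Int) :=
          ih b k (i+1) (by omega) (by omega)
        simp only [safeA_eq_okB, hcur, hskip]
        rw [foldl_if_gt_filterMap]
        have hfm : (PySem.List.pyRange 0 (b.length : Int) 1).filterMap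
              (fun j => if okB (pairsOf b 0) i j then
                some (k + (1 + W ((b.length : Int) - (i+1)).toNat (pairsOf b 0 ++ [(i, j)]) (i+1) (b.length : Int)))
              else none)
            = ((PySem.List.pyRange 0 (b.length : Int) 1).filterMap
              (fun j => if okB (pairsOf b 0) i j then
                some (1 + W ((b.length : Int) - (i+1)).toNat (pairsOf b 0 ++ [(i, j)]) (i+1) (b.length : Int))
              else none)).map (fun v => k + v) := by
          rw [List.map_filterMap]
          apply List.filterMap_congr
          intro j _
          split_ifs <;> rfl
        rw [hfm]
        have hadd := foldl_max_add ((PySem.List.pyRange 0 (b.length : Int) 1).filterMap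
              (fun j => if okB (pairsOf b 0) i j then
                some (1 + W ((b.length : Int) - (i+1)).toNat (pairsOf b 0 ++ [(i, j)]) (i+1) (b.length : Int))
              else none)) k 0
        rw [add_zero] at hadd
        rw [hadd, if_gt_eq_max, max_add_add_left]
        congr 1
        have hs0 : (0:Int) ≤ W ((b.length : Int) - (i+1)).toNat (pairsOf b 0) (i+1) (b.length : Int) :=
          W_nonneg _ _ _ _
        have h1 := foldl_max_max ((PySem.List.pyRange 0 (b.length : Int) 1).filterMap
              (fun j => if okB (pairsOf b 0) i j then
                some (1 + W ((b.length : Int) - (i+1)).toNat (pairsOf b 0 ++ [(i, j)]) (i+1) (b.length : Int))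
              else none)) 0 (W ((b.length : Int) - (i+1)).toNat (pairsOf b 0) (i+1) (b.length : Int))
        rw [max_eq_right hs0] at h1
        rw [h1, max_comm]

-- ===== B-side bridge: the frontier loop computes W =====

-- the pure (no self-row exemption) legality test B's membership tests implement
def okP (placed : List (Int × Int)) (r c : Int) : Bool :=
  placed.all fun q => q.2 != c && (q.1 - q.2) != (r - c) && (q.1 + q.2) != (r + c)

-- abstraction of a frontier state as the list of placed queens it came from
def toSt (placed : List (Int × Int)) : List Int × List Int × List Int × Int :=
  (placed.map Prod.snd, placed.map (fun p => p.1 - p.2), placed.map (fun p => p.1 + p.2),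
   (placed.length : Int) - 1)

-- the successors one row step produces from one state
def kids (n r : Int) (placed : List (Int × Int)) : List (List (Int × Int)) :=
  placed :: ((PySem.List.pyRange 0 n 1).filter (fun c => okP placed r c)).map
    (fun c => placed ++ [(r, c)])

lemma okState_toSt (placed : List (Int × Int)) (r c : Int) :
    (!((toSt placed).1.contains c) && !((toSt placed).2.1.contains (r - c))
      && !((toSt placed).2.2.1.contains (r + c))) = okP placed r c := by
  rw [Bool.eq_iff_iff]
  simp only [toSt, okP, Bool.and_eq_true, Bool.not_eq_true', List.contains_eq_mem,
    decide_eq_false_iff_not, List.mem_map, List.all_eq_true, not_exists, Bool.and_eq_true,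
    bne_iff_ne, ne_eq]
  constructor
  · rintro ⟨⟨h1, h2⟩, h3⟩ q hq
    exact ⟨⟨fun h => h1 q ⟨hq, h⟩, fun h => h2 q ⟨hq, h⟩⟩, fun h => h3 q ⟨hq, h⟩⟩
  · intro h
    refine ⟨⟨?_, ?_⟩, ?_⟩ <;> rintro q ⟨hq, he⟩
    · exact (h q hq).1.1 he
    · exact (h q hq).1.2 he
    · exact (h q hq).2 he

lemma toSt_append (placed : List (Int × Int)) (r c : Int) :
    ((toSt placed).1 ++ [c], (toSt placed).2.1 ++ [r - c], (toSt placed).2.2.1 ++ [r + c],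
      (toSt placed).2.2.2 + 1) = toSt (placed ++ [(r, c)]) := by
  simp only [toSt, List.map_append, List.map_cons, List.map_nil, List.length_append,
    List.length_cons, List.length_nil, Prod.mk.injEq, true_and]
  push_cast
  ring

-- one row step, on abstract frontiers
lemma step_eq (n r : Int) (P : List (List (Int × Int))) :
    ∀ (acc : List (List Int × List Int × List Int × Int)),
    (P.map toSt).foldl (fun nxt st =>
      let nxt := nxt ++ [st]
      (PySem.List.pyRange 0 n 1).foldl (fun nxt c =>
        if !(st.1.contains c) && !(st.2.1.contains (r - c)) && !(st.2.2.1.contains (r + c)) then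
          nxt ++ [(st.1 ++ [c], st.2.1 ++ [r - c], st.2.2.1 ++ [r + c], st.2.2.2 + 1)]
        else nxt) nxt) acc
    = acc ++ (P.flatMap (kids n r)).map toSt := by
  induction P with
  | nil => intro acc; simp
  | cons placed t ih =>
    intro acc
    simp only [List.map_cons, List.foldl_cons, List.flatMap_cons, List.map_append]
    have hinner : (PySem.List.pyRange 0 n 1).foldl (fun nxt c =>
        if !((toSt placed).1.contains c) && !((toSt placed).2.1.contains (r - c))
            && !((toSt placed).2.2.1.contains (r + c)) then
          nxt ++ [((toSt placed).1 ++ [c], (toSt placed).2.1 ++ [r - c],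
            (toSt placed).2.2.1 ++ [r + c], (toSt placed).2.2.2 + 1)]
        else nxt) (acc ++ [toSt placed])
        = acc ++ (kids n r placed).map toSt := by
      have hcongr := PySem.List.foldl_congr_mem
        (l := PySem.List.pyRange 0 n 1)
        (f := fun nxt c =>
          if !((toSt placed).1.contains c) && !((toSt placed).2.1.contains (r - c))
              && !((toSt placed).2.2.1.contains (r + c)) then
            nxt ++ [((toSt placed).1 ++ [c], (toSt placed).2.1 ++ [r - c],
              (toSt placed).2.2.1 ++ [r + c], (toSt placed).2.2.2 + 1)]
          else nxt)
        (g := fun nxt c =>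
          if okP placed r c then nxt ++ [toSt (placed ++ [(r, c)])] else nxt)
        (init := acc ++ [toSt placed])
        (by intro a c _; simp only [okState_toSt, toSt_append])
      rw [hcongr, PySem.List.foldl_append_if]
      simp only [kids, List.map_cons, List.map_map]
      rw [List.append_assoc]
      rfl
    rw [hinner, ih]
    rw [List.append_assoc]

-- pyMax facts
lemma foldl_max_init (l : List Int) : ∀ (a b : Int), l.foldl max (max a b) = max a (l.foldl max b) := by
  induction l with
  | nil => intro a b; rfl
  | cons y t ih =>
    intro a b
    simp only [List.foldl_cons]
    rw [max_assoc, ih]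

lemma foldl_max_pyMax (x : Int) (t : List Int) (a : Int) :
    (x :: t).foldl max a = max a (pyMax (x :: t)) := by
  simp only [List.foldl_cons, pyMax]
  rw [← foldl_max_init]

lemma pyMax_append (l1 l2 : List Int) (h1 : l1 ≠ []) (h2 : l2 ≠ []) :
    pyMax (l1 ++ l2) = max (pyMax l1) (pyMax l2) := by
  match l1, l2 with
  | [], _ => exact absurd rfl h1
  | _, [] => exact absurd rfl h2
  | x :: t, y :: s =>
    show pyMax (x :: (t ++ y :: s)) = _
    simp only [pyMax, List.foldl_append]
    rw [foldl_max_pyMax y s (t.foldl max x)]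
    rfl

lemma pyMax_cons (a : Int) (l : List Int) (hl : l ≠ []) : pyMax (a :: l) = max a (pyMax l) := by
  have h := pyMax_append [a] l (by simp) hl
  simpa using h

lemma pyMax_flatMap {α : Type} (P : List α) (h : α → List Int)
    (hP : P ≠ []) (hh : ∀ x ∈ P, h x ≠ []) :
    pyMax (P.flatMap h) = pyMax (P.map (fun x => pyMax (h x))) := by
  induction P with
  | nil => exact absurd rfl hP
  | cons x t ih =>
    cases t with
    | nil =>
      simp only [List.flatMap_cons, List.flatMap_nil, List.append_nil, List.map_cons, List.map_nil]
      rfl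
    | cons y s =>
      have htne : (y :: s).flatMap h ≠ [] := by
        simp only [List.flatMap_cons]
        exact List.append_ne_nil_of_left_ne_nil (hh y (by simp)) _
      have hstep : pyMax ((x :: y :: s).map (fun z => pyMax (h z)))
          = max (pyMax (h x)) (pyMax ((y :: s).map (fun z => pyMax (h z)))) := by
        rw [List.map_cons]
        exact pyMax_cons _ _ (by simp)
      rw [List.flatMap_cons, pyMax_append _ _ (hh x (by simp)) htne,
        ih (by simp) (fun z hz => hh z (List.mem_cons_of_mem x hz)), hstep]

lemma filterMap_if {α β : Type} (l : List α) (p : α → Bool) (f : α → β) :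
    l.filterMap (fun x => if p x then some (f x) else none) = (l.filter p).map f := by
  induction l with
  | nil => rfl
  | cons x t ih => by_cases h : p x <;> simp [h, ih]

-- the value of one state, seen from row r
def cgain (n r : Int) (placed : List (Int × Int)) : Int :=
  ((placed.length : Int) - 1) + W (n - r).toNat placed r n

lemma okP_eq_okB {placed : List (Int × Int)} {r : Int}
    (h : ∀ q ∈ placed, q.1 ≠ r) (c : Int) : okP placed r c = okB placed r c := by
  rw [Bool.eq_iff_iff]
  simp only [okP, okB, List.all_eq_true]
  constructor
  · intro hp q hq
    have := hp q hq
    have hne := h q hq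
    simp only [Bool.and_eq_true, bne_iff_ne, ne_eq] at this
    simp only [Bool.or_eq_true, Bool.and_eq_true, beq_iff_eq, bne_iff_ne, ne_eq]
    right
    refine ⟨this.1.1, ?_⟩
    omega
  · intro hp q hq
    have := hp q hq
    have hne := h q hq
    simp only [Bool.or_eq_true, Bool.and_eq_true, beq_iff_eq, bne_iff_ne, ne_eq] at this
    simp only [Bool.and_eq_true, bne_iff_ne, ne_eq]
    rcases this with h1 | ⟨h1, h2⟩
    · exact absurd h1 hne
    · refine ⟨⟨h1, ?_⟩, ?_⟩ <;> omega

-- expanding one state at row r preserves its value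
lemma node_eq {n r : Int} {placed : List (Int × Int)} (hr : r < n)
    (hrow : ∀ q ∈ placed, q.1 ≠ r) :
    pyMax ((kids n r placed).map (cgain n (r+1))) = cgain n r placed := by
  have hk : (n - r).toNat = (n - (r+1)).toNat + 1 := by omega
  have hnoany : ¬ (placed.any (fun rc => rc.1 == r) = true) := by
    simp only [List.any_eq_true, not_exists]
    rintro q ⟨hq, hqr⟩
    exact hrow q hq (by simpa using hqr)
  have hfilter : (PySem.List.pyRange 0 n 1).filter (fun c => okP placed r c)
      = (PySem.List.pyRange 0 n 1).filter (fun c => okB placed r c) :=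
    List.filter_congr (fun c _ => okP_eq_okB hrow c)
  simp only [kids, List.map_cons, List.map_map]
  show pyMax (cgain n (r+1) placed
      :: ((PySem.List.pyRange 0 n 1).filter (fun c => okP placed r c)).map
          ((cgain n (r+1)) ∘ (fun c => placed ++ [(r, c)]))) = _
  have hmapeq : ((PySem.List.pyRange 0 n 1).filter (fun c => okP placed r c)).map
        ((cgain n (r+1)) ∘ (fun c => placed ++ [(r, c)]))
      = (((PySem.List.pyRange 0 n 1).filter (fun c => okB placed r c)).map
          (fun c => 1 + W (n - (r+1)).toNat (placed ++ [(r, c)]) (r+1) n)).map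
          (fun v => ((placed.length : Int) - 1) + v) := by
    rw [hfilter, List.map_map]
    apply List.map_congr_left
    intro c _
    simp only [Function.comp, cgain, List.length_append, List.length_cons, List.length_nil]
    push_cast
    ring
  show (((PySem.List.pyRange 0 n 1).filter (fun c => okP placed r c)).map
      ((cgain n (r+1)) ∘ (fun c => placed ++ [(r, c)]))).foldl max (cgain n (r+1) placed) = _
  rw [hmapeq]
  have hbase : cgain n (r+1) placed = ((placed.length : Int) - 1) + W (n - (r+1)).toNat placed (r+1) n := rfl
  rw [hbase, foldl_max_add]
  simp only [cgain, hk, W, if_neg (not_le.mpr hr), if_neg hnoany]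
  rw [filterMap_if]

-- the layered loop, from row r on, computes the max of cgain over the frontier
lemma layers (i n : Int) : ∀ (m : Nat) (r : Int) (P : List (List (Int × Int))),
    n ≤ r + m →
    P ≠ [] →
    (∀ placed ∈ P, ∃ q ∈ placed, q.1 = i) →
    (∀ placed ∈ P, ∀ q ∈ placed, q.1 = i ∨ q.1 < r) →
    pyMax ((((PySem.List.pyRange r n 1).foldl (fun frontier r =>
      if r == i then frontier
      else frontier.foldl (fun nxt st =>
        let nxt := nxt ++ [st]
        (PySem.List.pyRange 0 n 1).foldl (fun nxt c =>
          if !(st.1.contains c) && !(st.2.1.contains (r - c)) && !(st.2.2.1.contains (r + c)) then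
            nxt ++ [(st.1 ++ [c], st.2.1 ++ [r - c], st.2.2.1 ++ [r + c], st.2.2.2 + 1)]
          else nxt) nxt) []) (P.map toSt))).map (fun st => st.2.2.2))
    = pyMax (P.map (cgain n r)) := by
  intro m
  induction m with
  | zero =>
    intro r P hnr hP h1 h2
    rw [PySem.List.pyRange_one_eq_nil (by omega : n ≤ r)]
    simp only [List.foldl_nil, List.map_map]
    congr 1
    apply List.map_congr_left
    intro placed _
    have h0 : (n - r).toNat = 0 := by omega
    simp only [Function.comp, toSt, cgain, h0, W]
    ring
  | succ m ih =>
    intro r P hnr hP h1 h2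
    by_cases hrn : n ≤ r
    · rw [PySem.List.pyRange_one_eq_nil hrn]
      simp only [List.foldl_nil, List.map_map]
      congr 1
      apply List.map_congr_left
      intro placed _
      have h0 : (n - r).toNat = 0 := by omega
      simp only [Function.comp, toSt, cgain, h0, W]
      ring
    · have hrlt : r < n := by omega
      rw [PySem.List.pyRange_one_cons hrlt, List.foldl_cons]
      by_cases hri : r = i
      · have hb : (r == i) = true := beq_iff_eq.mpr hri
        simp only [hb, if_true]
        rw [ih (r+1) P (by omega) hP h1
          (fun placed hp q hq => (h2 placed hp q hq).imp (fun h => h) (fun h => by omega))]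
        congr 1
        apply List.map_congr_left
        intro placed hp
        obtain ⟨q, hq, hqi⟩ := h1 placed hp
        have hany : placed.any (fun rc => rc.1 == r) = true :=
          List.any_eq_true.mpr ⟨q, hq, by simp [hqi, hri]⟩
        have hk : (n - r).toNat = (n - (r+1)).toNat + 1 := by omega
        simp only [cgain, hk, W]
        rw [if_neg (not_le.mpr hrlt), if_pos hany]
      · have hb : (r == i) = false := by simp [hri]
        simp only [hb, Bool.false_eq_true, if_false]
        rw [step_eq n r P []]
        rw [List.nil_append]
        have hP' : P.flatMap (kids n r) ≠ [] := by
          match P, hP with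
          | placed :: t, _ =>
            simp only [List.flatMap_cons, kids, List.cons_append]
            exact List.cons_ne_nil _ _
        rw [ih (r+1) (P.flatMap (kids n r)) (by omega) hP'
          (by
            intro placed' hp'
            obtain ⟨placed, hp, hk⟩ := List.mem_flatMap.mp hp'
            obtain ⟨q, hq, hqi⟩ := h1 placed hp
            simp only [kids, List.mem_cons, List.mem_map, List.mem_filter] at hk
            rcases hk with rfl | ⟨c, _, rfl⟩
            · exact ⟨q, hq, hqi⟩
            · exact ⟨q, List.mem_append_left _ hq, hqi⟩)
          (by
            intro placed' hp' q hq
            obtain ⟨placed, hp, hk⟩ := List.mem_flatMap.mp hp'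
            simp only [kids, List.mem_cons, List.mem_map, List.mem_filter] at hk
            rcases hk with rfl | ⟨c, _, rfl⟩
            · rcases h2 _ hp q hq with h | h
              · left; exact h
              · right; omega
            · rcases List.mem_append.mp hq with hq | hq
              · rcases h2 _ hp q hq with h | h
                · left; exact h
                · right; omega
              · simp only [List.mem_singleton] at hq
                subst hq
                right
                omega)]
        rw [List.map_flatMap]
        rw [pyMax_flatMap P _ hP
          (by intro placed _; simp [kids])]
        congr 1
        apply List.map_congr_left
        intro placed hp
        exact node_eq hrlt (by
          intro q hq
          rcases h2 placed hp q hq with h | h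
          · omega
          · omega)

-- the frontier loop equals W on the seed state
lemma maxFriends_eq {n i j : Int} (hi0 : 0 ≤ i) (hin : i < n) :
    maxFriends n i j = W n.toNat [(i, j)] 0 n := by
  have hseed : ([([j], [i - j], [i + j], (0 : Int))] :
      List (List Int × List Int × List Int × Int)) = [[(i, j)]].map toSt := by
    simp [toSt]
  simp only [maxFriends]
  rw [hseed]
  rw [layers i n n.toNat 0 [[(i, j)]] (by omega) (by simp)
    (by rintro placed hp; simp only [List.mem_singleton] at hp; subst hp; exact ⟨(i, j), by simp, rfl⟩)
    (by rintro placed hp q hq; simp only [List.mem_singleton] at hp; subst hp;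
        simp only [List.mem_singleton] at hq; subst hq; left; rfl)]
  simp only [List.map_cons, List.map_nil]
  show cgain n 0 [(i, j)] = _
  simp only [cgain, List.length_cons, List.length_nil]
  have : (n - 0).toNat = n.toNat := by omega
  rw [this]
  push_cast
  ring

-- running minimum with reset/append = (min, filter)
def minFold (L : List ((Int × Int) × Int)) (m0 : Int) : Int :=
  L.foldl (fun m pv => if pv.2 < m then pv.2 else m) m0

def selFold (L : List ((Int × Int) × Int)) (m : Int) : List (Int × Int) :=
  L.filterMap (fun pv => if pv.2 = m then some pv.1 else none)

lemma minFold_le_init (L : List ((Int × Int) × Int)) : ∀ m0, minFold L m0 ≤ m0 := by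
  induction L with
  | nil => intro m0; simp [minFold]
  | cons pv t ih =>
    intro m0
    simp only [minFold, List.foldl_cons]
    by_cases h : pv.2 < m0
    · simp only [if_pos h]
      exact le_trans (ih pv.2) (le_of_lt h)
    · simp only [if_neg h]
      exact ih m0

lemma scan_min_filter (L : List ((Int × Int) × Int)) : ∀ (m0 : Int) (acc : List (Int × Int)),
    L.foldl (fun st pv =>
        if pv.2 < st.1 then (pv.2, [pv.1])
        else if pv.2 = st.1 then (st.1, st.2 ++ [pv.1])
        else st) (m0, acc)
      = (minFold L m0, (if minFold L m0 = m0 then acc else []) ++ selFold L (minFold L m0)) := by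
  induction L with
  | nil =>
    intro m0 acc
    simp [minFold, selFold]
  | cons pv t ih =>
    intro m0 acc
    have hM := minFold_le_init t
    have hsel : ∀ m : Int, selFold (pv :: t) m = (if pv.2 = m then [pv.1] else []) ++ selFold t m := by
      intro m
      simp only [selFold, List.filterMap_cons]
      split_ifs <;> simp
    have hmin : minFold (pv :: t) m0 = minFold t (if pv.2 < m0 then pv.2 else m0) := rfl
    simp only [List.foldl_cons]
    by_cases h1 : pv.2 < m0
    · rw [if_pos h1, hmin, if_pos h1, ih, hsel]
      have h2 : minFold t pv.2 ≠ m0 := by have := hM pv.2; omega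
      rw [if_neg h2]
      by_cases h3 : minFold t pv.2 = pv.2
      · rw [if_pos h3, if_pos h3.symm]
        simp
      · rw [if_neg h3, if_neg (fun h => h3 h.symm)]
        simp
    · rw [if_neg h1, hmin, if_neg h1]
      by_cases h2 : pv.2 = m0
      · rw [if_pos h2, ih, hsel]
        by_cases h3 : minFold t m0 = m0
        · rw [if_pos h3, if_pos h3, if_pos (by omega : pv.2 = minFold t m0)]
          simp
        · rw [if_neg h3, if_neg h3, if_neg (by have := hM m0; omega : ¬ pv.2 = minFold t m0)]
          simp
      · rw [if_neg h2, ih, hsel]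
        have h3 : ¬ pv.2 = minFold t m0 := by have := hM m0; omega
        rw [if_neg h3]
        simp

lemma nested_to_scan (l1 l2 : List Int) (v : Int → Int → Int) (init : Int × List (Int × Int)) :
    l1.foldl (fun st i => l2.foldl (fun st j =>
        if v i j < st.1 then (v i j, [(i, j)])
        else if v i j = st.1 then (st.1, st.2 ++ [(i, j)])
        else st) st) init
      = ((l1.flatMap (fun i => l2.map (fun j => (i, j)))).map (fun p => (p, v p.1 p.2))).foldl
          (fun st pv => if pv.2 < st.1 then (pv.2, [pv.1])
            else if pv.2 = st.1 then (st.1, st.2 ++ [pv.1]) else st) init := by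
  induction l1 generalizing init with
  | nil => rfl
  | cons x t ih =>
    rw [List.foldl_cons, ih]
    simp only [List.flatMap_cons, List.map_append, List.foldl_append]
    congr 1
    rw [List.map_map, List.foldl_map]
    rfl

theorem intriga_spec_aux (n : Int) : intriga n = intriga_alt n := by
  simp only [intriga, intriga_alt]
  have htl : ((PySem.List.pyRange 0 n 1).map (fun _ => (none : Option Int))).length = n.toNat := by
    simp [PySem.List.length_pyRange_one]
  have hlen : PySem.List.len ((PySem.List.pyRange 0 n 1).map (fun _ => (none : Option Int)))
      = ((n.toNat : Nat) : Int) := by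
    simp [PySem.List.len_eq]
  have hrange : PySem.List.pyRange 0 ((n.toNat : Nat) : Int) 1 = PySem.List.pyRange 0 n 1 := by
    rw [PySem.List.pyRange_one, PySem.List.pyRange_one]
    congr 2
    omega
  simp only [hlen, htl, hrange]
  -- flatten A's nested loop into a scan over the flat index list
  rw [nested_to_scan (PySem.List.pyRange 0 n 1) (PySem.List.pyRange 0 n 1)
    (fun i j => rainhaA (n.toNat + 1)
      (PySem.List.pySetD ((PySem.List.pyRange 0 n 1).map (fun _ => (none : Option Int))) i (some j)) 1 0)
    (((n.toNat : Nat) : Int), [])]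
  -- per-cell: A's rainha value = B's 1 + _max_friends value
  have hcell : ∀ p ∈ (PySem.List.pyRange 0 n 1).flatMap
      (fun i => (PySem.List.pyRange 0 n 1).map (fun j => (i, j))),
      ((p : Int × Int), rainhaA (n.toNat + 1)
          (PySem.List.pySetD ((PySem.List.pyRange 0 n 1).map (fun _ => (none : Option Int))) p.1 (some p.2)) 1 0)
        = (p, 1 + maxFriends n p.1 p.2) := by
    rintro ⟨pi, pj⟩ hp
    simp only [List.mem_flatMap, List.mem_map, PySem.List.mem_pyRange_one,
      Prod.mk.injEq] at hp
    obtain ⟨i, ⟨hi0, hin⟩, j, ⟨hj0, hjn⟩, rfl, rfl⟩ := hp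
    simp only [Prod.mk.injEq, true_and]
    rw [PySem.List.pySetD_of_nonneg _ (some j) hi0]
    have hiN : i.toNat < ((PySem.List.pyRange 0 n 1).map (fun _ => (none : Option Int))).length := by
      rw [htl]; omega
    have hb'len : (((PySem.List.pyRange 0 n 1).map (fun _ => (none : Option Int))).set i.toNat (some j)).length
        = n.toNat := by
      rw [List.length_set, htl]
    rw [rainha_eq (n.toNat + 1) _ 1 0 le_rfl (by rw [hb'len]; push_cast; omega)]
    rw [maxFriends_eq hi0 hin]
    congr 1
    rw [hb'len]
    have hidx : (((n.toNat : Nat) : Int) - 0).toNat = n.toNat := by omega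
    rw [hidx]
    rw [show ((n.toNat : Nat) : Int) = n from by omega]
    apply W_ext
    intro x
    rw [mem_pairsOf_set hi0 hiN (by simp) j]
    rw [pairsOf_of_all_none (by intro a ha; simp at ha; exact ha.2) 0]
    simp
  rw [List.map_congr_left hcell]
  rw [scan_min_filter]
  simp only [ite_self, List.nil_append]
  -- B's vals-building loop is the same flat list
  simp only [PySem.List.foldl_append_singleton_eq_map]
  rw [PySem.List.foldl_append_eq_flatMap]
  simp only [List.nil_append]
  have hflat : (PySem.List.pyRange 0 n 1).flatMap
        (fun i => (PySem.List.pyRange 0 n 1).map (fun j => ((i, j), 1 + maxFriends n i j)))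
      = ((PySem.List.pyRange 0 n 1).flatMap (fun i => (PySem.List.pyRange 0 n 1).map (fun j => (i, j)))).map
          (fun p => (p, 1 + maxFriends n p.1 p.2)) := by
    simp [List.map_flatMap, List.map_map, Function.comp_def]
  rw [hflat]
  rw [show ((n.toNat : Nat) : Int) = max 0 n from by rw [Int.toNat_eq_max, max_comm]]
  rfl

-- ===== VERDICT (by name: the statement is the Claim_ definition above) =====
theorem intriga_spec : Claim_equal_intriga := by
  intro n _
  unfold Spec_intriga
  exact intriga_spec_aux n
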